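-- pv_equiv track=rewrite | github.com/a6166231/python_tool | checkSpine/checkSpine.py | endsIndex
-- ===== SOURCE A (Python) =====
-- def endsIndex(s, sub):
--     index = -1
--     if len(sub) > len(s):
--         return index
--     subindex = 0
--     for i in range(len(s) - len(sub), len(s)):
--         if(s[i] != sub[subindex]):
--             return index
--         subindex+=1
--     return len(s) - len(sub)
-- ===== SOURCE B (Python) =====
-- def endsIndex(s, sub):
--     start = len(s) - len(sub)
--     if start < 0:
--         return -1
--     return start if s[start:] == sub else -1
-- ===== Notes on version B (the rewrite author's own statement) =====
-- stated objective: simpler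
-- what changed: Replaces the index-maintaining elementwise loop with early exit by a single slice-and-compare: start = len(s)-len(sub), return start if s[start:] == sub else -1.
import Mathlib
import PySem

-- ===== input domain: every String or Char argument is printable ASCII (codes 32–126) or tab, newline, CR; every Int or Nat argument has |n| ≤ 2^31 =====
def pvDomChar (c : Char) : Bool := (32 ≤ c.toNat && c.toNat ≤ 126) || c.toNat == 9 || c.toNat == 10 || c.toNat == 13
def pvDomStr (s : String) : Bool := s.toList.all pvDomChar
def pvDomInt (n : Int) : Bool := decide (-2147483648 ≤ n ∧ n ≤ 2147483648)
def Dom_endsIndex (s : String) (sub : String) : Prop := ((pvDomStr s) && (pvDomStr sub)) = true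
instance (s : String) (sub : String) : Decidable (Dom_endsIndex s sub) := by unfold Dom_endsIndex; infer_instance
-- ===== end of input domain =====

-- B replaces A's index-maintaining elementwise loop (early exit) by a single slice-and-compare; objective: simpler.

-- ===== PORT A =====
-- the 'for i in range(...)' loop with early return -1 and the running subindex
def endsIndexLoop (sl subl : List Char) (is : List Int) (subindex : Nat) : Int :=
  match is with
  | [] => (sl.length : Int) - (subl.length : Int)
  | i :: rest =>
      if PySem.List.pyGetD sl i ' ' ≠ PySem.List.pyGetD subl (subindex : Int) ' ' then -1
      else endsIndexLoop sl subl rest (subindex + 1)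

def endsIndex (s : String) (sub : String) : Int :=
  let sl := s.toList
  let subl := sub.toList
  if (subl.length : Int) > (sl.length : Int) then -1
  else endsIndexLoop sl subl
        (PySem.List.pyRange ((sl.length : Int) - (subl.length : Int)) (sl.length : Int) 1) 0

-- ===== PORT B =====
def endsIndex_alt (s : String) (sub : String) : Int :=
  let start : Int := (s.toList.length : Int) - (sub.toList.length : Int)
  if start < 0 then -1
  else if PySem.List.slice s.toList (some start) none = sub.toList then start else -1

-- ===== PRECONDITION & SPEC =====
def Spec_endsIndex (s : String) (sub : String) (out : Int) : Prop := out = endsIndex_alt s sub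
instance (s : String) (sub : String) (out : Int) : Decidable (Spec_endsIndex s sub out) := by unfold Spec_endsIndex; infer_instance

-- ===== CLAIM (what is proved, stated in full; the proofs are below) =====
def Claim_equal_endsIndex : Prop := ∀ (s : String) (sub : String), Dom_endsIndex s sub → Spec_endsIndex s sub (endsIndex s sub)

-- ===== LEMMAS AND PROOFS =====

-- the loop over range(d+j, n) with subindex j decides whether drop (d+j) sl = drop j subl
theorem endsIndexLoop_eq (sl subl : List Char) (j : Nat)
    (hj : j ≤ subl.length) (hlen : subl.length ≤ sl.length) :
    endsIndexLoop sl subl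
      (PySem.List.pyRange ((sl.length - subl.length + j : Nat) : Int) (sl.length : Int) 1) j
    = if sl.drop (sl.length - subl.length + j) = subl.drop j
      then ((sl.length : Int) - (subl.length : Int)) else -1 := by
  induction hn : subl.length - j generalizing j with
  | zero =>
      have hjm : j = subl.length := by omega
      subst hjm
      have h1 : (sl.length - subl.length + subl.length : Nat) = sl.length := by omega
      rw [h1]
      have h2 : PySem.List.pyRange (sl.length : Int) (sl.length : Int) 1 = [] := by
        simp
      rw [h2]
      simp [endsIndexLoop, List.drop_length]
  | succ k ih =>
      have hjlt : j < subl.length := by omega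
      set d := sl.length - subl.length with hd
      have hdj : d + j < sl.length := by omega
      have hcons : PySem.List.pyRange ((d + j : Nat) : Int) (sl.length : Int) 1
          = ((d + j : Nat) : Int) :: PySem.List.pyRange (((d + j : Nat) : Int) + 1) (sl.length : Int) 1 := by
        exact PySem.List.pyRange_one_cons (by exact_mod_cast hdj)
      rw [hcons]
      have hget1 : PySem.List.pyGetD sl ((d + j : Nat) : Int) ' ' = sl[d + j]'hdj := by
        rw [PySem.List.pyGetD_natCast]; exact List.getD_eq_getElem _ _ hdj
      have hget2 : PySem.List.pyGetD subl ((j : Nat) : Int) ' ' = subl[j]'hjlt := by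
        rw [PySem.List.pyGetD_natCast]; exact List.getD_eq_getElem _ _ hjlt
      have hnext : (((d + j : Nat) : Int) + 1) = ((d + (j+1) : Nat) : Int) := by push_cast; ring
      have hdrop1 : sl.drop (d + j) = sl[d + j]'hdj :: sl.drop (d + j + 1) :=
        List.drop_eq_getElem_cons hdj
      have hdrop2 : subl.drop j = subl[j]'hjlt :: subl.drop (j + 1) :=
        List.drop_eq_getElem_cons hjlt
      show endsIndexLoop sl subl _ j = _
      rw [endsIndexLoop]
      rw [hget1, hget2, hnext]
      by_cases heq : sl[d + j]'hdj = subl[j]'hjlt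
      · simp only [heq, ne_eq, not_true_eq_false, if_false]
        rw [ih (j + 1) (by omega) (by omega)]
        rw [hdrop1, heq, show d + j + 1 = d + (j + 1) from by omega]
        simp only [hdrop2, List.cons.injEq, true_and]
      · simp only [ne_eq, heq, not_false_eq_true, if_true]
        have hne : ¬ (sl.drop (d + j) = subl.drop j) := by
          rw [hdrop1, hdrop2]
          intro hcon
          simp only [List.cons.injEq] at hcon
          exact heq hcon.1
        rw [if_neg hne]

-- ===== VERDICT (by name: the statement is the Claim_ definition above) =====
theorem endsIndex_spec : Claim_equal_endsIndex := by
  intro s sub _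
  unfold Spec_endsIndex endsIndex endsIndex_alt
  set sl := s.toList
  set subl := sub.toList
  by_cases hlen : subl.length ≤ sl.length
  · have hgt : ¬ ((subl.length : Int) > (sl.length : Int)) := by exact_mod_cast not_lt.mpr hlen
    have hnn : ¬ ((sl.length : Int) - (subl.length : Int) < 0) := by omega
    simp only [hgt, if_false, hnn, if_false]
    have hcast : ((sl.length : Int) - (subl.length : Int)) = ((sl.length - subl.length : Nat) : Int) := by
      omega
    have hstart := endsIndexLoop_eq sl subl 0 (Nat.zero_le _) hlen
    simp only [Nat.add_zero, List.drop_zero] at hstart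
    rw [hcast, hstart, hcast]
    have hslice : PySem.List.slice sl (some ((sl.length - subl.length : Nat) : Int)) none
        = sl.drop (sl.length - subl.length) := PySem.List.slice_from_natCast sl _
    rw [hslice]
    rfl
  · have hgt : ((subl.length : Int) > (sl.length : Int)) := by exact_mod_cast not_le.mp hlen
    have hneg : ((sl.length : Int) - (subl.length : Int) < 0) := by omega
    simp only [hgt, if_true, hneg, if_true]
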